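-- pv_equiv track=rewrite | github.com/xiyiwang/leetcode-challenge-solutions | 2021-04/2021-04-26-furthestBuilding.py | furthestBuilding2
-- ===== SOURCE A (Python) =====
-- from heapq import heappush, heappop
--
-- def furthestBuilding2(heights: list, bricks: int, ladders: int) -> int:
--     heap = []
--
--     for i in range(len(heights) - 1):
--         diff = heights[i+1] - heights[i]
--         if diff > 0:
--             if ladders > 0:
--                 heappush(heap, diff)
--                 ladders -= 1
--             elif heap and diff > heap[0]:
--                 heappush(heap, diff)
--                 bricks -= heappop(heap)
--             else: bricks -= diff
--             if bricks < 0: return i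
--
--     return len(heights) - 1
-- ===== SOURCE B (Python) =====
-- def furthestBuilding2(heights: list, bricks: int, ladders: int) -> int:
--     pos = []
--
--     for i in range(len(heights) - 1):
--         d = heights[i + 1] - heights[i]
--         if d > 0:
--             pos.append(d)
--             # feasibility check: ladders cover the largest max(ladders,0) climbs,
--             # bricks must pay for the rest of the positive diffs seen so far
--             cut = max(len(pos) - max(ladders, 0), 0)
--             paid = sum(sorted(pos)[:cut])
--             if bricks < paid:
--                 return i
--
--     return len(heights) - 1
-- ===== Notes on version B (the rewrite author's own statement) =====
-- stated objective: alternative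
-- what changed: Replaces the min-heap greedy (mutating heap/bricks/ladders state) with a per-step sort-based feasibility check: collect the positive diffs seen so far and fail at the first index where the sum of all but the largest max(ladders,0) of them exceeds bricks.
import Mathlib
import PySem

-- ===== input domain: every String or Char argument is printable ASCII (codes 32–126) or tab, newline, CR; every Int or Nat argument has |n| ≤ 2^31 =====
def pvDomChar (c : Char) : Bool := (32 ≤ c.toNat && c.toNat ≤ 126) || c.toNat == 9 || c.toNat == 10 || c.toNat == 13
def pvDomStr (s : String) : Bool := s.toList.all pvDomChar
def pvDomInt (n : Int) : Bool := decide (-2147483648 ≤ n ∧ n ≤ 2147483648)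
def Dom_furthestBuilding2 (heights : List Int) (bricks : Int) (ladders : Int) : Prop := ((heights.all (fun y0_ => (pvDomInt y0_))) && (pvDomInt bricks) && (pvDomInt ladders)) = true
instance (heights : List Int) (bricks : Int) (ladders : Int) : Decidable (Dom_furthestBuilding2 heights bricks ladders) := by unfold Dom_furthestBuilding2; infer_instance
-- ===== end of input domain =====

-- B replaces A's one-pass min-heap greedy by a per-step sort-based feasibility check
-- (same return value; alternative decomposition, not claimed faster).


-- ===== PORT A =====
-- heapq is modelled as an ascending sorted list: heappush = ordered insert, heap[0] = head,
-- heappop = remove the head.  This is exact for A, which observes the heap only through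
-- heap[0], heappop's result and emptiness (never through the raw array layout).
def fbGo (heights : List Int) (bricks : Int) (ladders : Int) (i : Nat) (heap : List Int) : Int :=
  if h : i + 1 < heights.length then
    -- diff = heights[i+1] - heights[i]  (indices in range, so getD is exact)
    if 0 < heights.getD (i + 1) 0 - heights.getD i 0 then
      if 0 < ladders then
        -- heappush(heap, diff); ladders -= 1; if bricks < 0: return i
        if bricks < 0 then (i : Int)
        else fbGo heights bricks (ladders - 1) (i + 1)
               (List.orderedInsert (· ≤ ·) (heights.getD (i + 1) 0 - heights.getD i 0) heap)
      else if heap ≠ [] ∧ heap.headD 0 < heights.getD (i + 1) 0 - heights.getD i 0 then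
        -- heappush(heap, diff); bricks -= heappop(heap); if bricks < 0: return i
        if bricks - (List.orderedInsert (· ≤ ·) (heights.getD (i + 1) 0 - heights.getD i 0) heap).headD 0 < 0 then (i : Int)
        else fbGo heights
               (bricks - (List.orderedInsert (· ≤ ·) (heights.getD (i + 1) 0 - heights.getD i 0) heap).headD 0)
               ladders (i + 1)
               (List.orderedInsert (· ≤ ·) (heights.getD (i + 1) 0 - heights.getD i 0) heap).tail
      else
        -- bricks -= diff; if bricks < 0: return i
        if bricks - (heights.getD (i + 1) 0 - heights.getD i 0) < 0 then (i : Int)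
        else fbGo heights (bricks - (heights.getD (i + 1) 0 - heights.getD i 0)) ladders (i + 1) heap
    else fbGo heights bricks ladders (i + 1) heap
  else (heights.length : Int) - 1
termination_by heights.length - i
decreasing_by all_goals omega

def furthestBuilding2 (heights : List Int) (bricks : Int) (ladders : Int) : Int :=
  fbGo heights bricks ladders 0 []

-- ===== PORT B =====
-- per-step feasibility: pos = positive diffs so far; paid = sum(sorted(pos)[:cut]) with
-- cut = max(len(pos) - max(ladders, 0), 0); fail at the first i with bricks < paid.
def fbAltGo (heights : List Int) (bricks : Int) (ladders : Int) (i : Nat) (pos : List Int) : Int :=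
  if h : i + 1 < heights.length then
    if 0 < heights.getD (i + 1) 0 - heights.getD i 0 then
      if bricks <
          ((PySem.List.sorted (pos ++ [heights.getD (i + 1) 0 - heights.getD i 0]) (fun x => x)).take
            (max (((pos ++ [heights.getD (i + 1) 0 - heights.getD i 0]).length : Int) - max ladders 0) 0).toNat).sum
      then (i : Int)
      else fbAltGo heights bricks ladders (i + 1) (pos ++ [heights.getD (i + 1) 0 - heights.getD i 0])
    else fbAltGo heights bricks ladders (i + 1) pos
  else (heights.length : Int) - 1
termination_by heights.length - i
decreasing_by all_goals omega

def furthestBuilding2_alt (heights : List Int) (bricks : Int) (ladders : Int) : Int :=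
  fbAltGo heights bricks ladders 0 []

-- ===== PRECONDITION & SPEC =====
def Spec_furthestBuilding2 (heights : List Int) (bricks : Int) (ladders : Int) (out : Int) : Prop := out = furthestBuilding2_alt heights bricks ladders
instance (heights : List Int) (bricks : Int) (ladders : Int) (out : Int) : Decidable (Spec_furthestBuilding2 heights bricks ladders out) := by unfold Spec_furthestBuilding2; infer_instance

-- ===== CLAIM (what is proved, stated in full; the proofs are below) =====
def Claim_equal_furthestBuilding2 : Prop := ∀ (heights : List Int) (bricks : Int) (ladders : Int), Dom_furthestBuilding2 heights bricks ladders → Spec_furthestBuilding2 heights bricks ladders (furthestBuilding2 heights bricks ladders)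

-- ===== LEMMAS AND PROOFS =====

-- ordered insert passes over a block of strictly smaller elements
lemma oins_append_low (d : Int) (u v : List Int) (hu : ∀ b ∈ u, b < d) :
    List.orderedInsert (· ≤ ·) d (u ++ v) = u ++ List.orderedInsert (· ≤ ·) d v := by
  induction u with
  | nil => rfl
  | cons a u ih =>
    have ha : ¬ d ≤ a := by
      have := hu a (by simp)
      omega
    simp only [List.cons_append, List.orderedInsert, if_neg ha]
    rw [ih (fun b hb => hu b (by simp [hb]))]

-- ordered insert stops before a block of elements ≥ d
lemma oins_append_high (d : Int) (u v : List Int) (hv : ∀ b ∈ v, d ≤ b) :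
    List.orderedInsert (· ≤ ·) d (u ++ v) = List.orderedInsert (· ≤ ·) d u ++ v := by
  induction u with
  | nil =>
    cases v with
    | nil => rfl
    | cons b v => simp [List.orderedInsert, hv b (by simp)]
  | cons a u ih =>
    by_cases ha : d ≤ a
    · simp [List.orderedInsert, ha]
    · simp only [List.cons_append, List.orderedInsert, if_neg ha]
      rw [ih]

-- appending one element to the input of PySem's sort = ordered insert into the sorted output
lemma sorted_append_singleton (pos : List Int) (d : Int) :
    PySem.List.sorted (pos ++ [d]) (fun x => x) =
      List.orderedInsert (· ≤ ·) d (PySem.List.sorted pos (fun x => x)) := by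
  apply PySem.List.sorted_id_eq_of_perm_of_pairwise
  · exact ((List.perm_orderedInsert _ d _).trans
      ((PySem.List.sorted_perm pos (fun x => x) false).cons d)).trans
      (List.perm_append_singleton d pos).symm
  · exact List.Pairwise.orderedInsert d _ (PySem.List.sorted_pairwise pos (fun x => x))

-- the invariant: A's running state (heap, bricks, ladders) is determined by the list pos of
-- positive diffs seen so far — heap = top min(ladders⁺, |pos|) of pos (as a sorted list),
-- bricks = bricks₀ - (sum of the rest), ladders decremented once per heap element.
lemma go_eq (heights : List Int) (bricks0 ladders : Int) :
    ∀ (n i : Nat) (pos : List Int), heights.length - i ≤ n →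
    fbGo heights
      (bricks0 - ((PySem.List.sorted pos (fun x => x)).take (pos.length - ladders.toNat)).sum)
      (ladders - (min ladders.toNat pos.length : Nat)) i
      ((PySem.List.sorted pos (fun x => x)).drop (pos.length - ladders.toNat))
    = fbAltGo heights bricks0 ladders i pos := by
  intro n
  induction n with
  | zero =>
    intro i pos h
    rw [fbGo, fbAltGo]
    have hni : ¬ (i + 1 < heights.length) := by omega
    rw [dif_neg hni, dif_neg hni]
  | succ n ih =>
    intro i pos hn
    by_cases hlt : i + 1 < heights.length
    case neg => rw [fbGo, fbAltGo, dif_neg hlt, dif_neg hlt]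
    case pos =>
    rw [fbGo, fbAltGo, dif_pos hlt, dif_pos hlt]
    by_cases hdpos : 0 < heights.getD (i + 1) 0 - heights.getD i 0
    case neg =>
      rw [if_neg hdpos, if_neg hdpos]
      exact ih (i + 1) pos (by omega)
    case pos =>
    rw [if_pos hdpos, if_pos hdpos]
    set d := heights.getD (i + 1) 0 - heights.getD i 0 with hdd
    set s := PySem.List.sorted pos (fun x => x) with hs
    have hsl : s.length = pos.length := PySem.List.length_sorted pos _ false
    have hs' : PySem.List.sorted (pos ++ [d]) (fun x => x) = List.orderedInsert (· ≤ ·) d s :=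
      sorted_append_singleton pos d
    rw [hs']
    have hcut : (max (((pos ++ [d]).length : Int) - max ladders 0) 0).toNat
        = pos.length + 1 - ladders.toNat := by
      simp only [List.length_append, List.length_cons, List.length_nil]
      omega
    rw [hcut]
    have hIH := ih (i + 1) (pos ++ [d]) (by omega)
    rw [hs'] at hIH
    simp only [List.length_append, List.length_cons, List.length_nil, Nat.zero_add] at hIH
    have hoinsLen : (List.orderedInsert (· ≤ ·) d s).length = s.length + 1 := by
      rw [(List.perm_orderedInsert _ d s).length_eq]; rfl
    have hmono : ∀ (p q : Nat) (hp : p < s.length) (hq : q < s.length), p ≤ q → s[p]'hp ≤ s[q]'hq := by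
      intro p q hp hq hpq
      simp only [hs]
      exact PySem.List.sorted_id_getElem_mono pos hpq (by rw [← hs]; exact hq)
    by_cases hlad : 0 < ladders - ((min ladders.toNat pos.length : Nat) : Int)
    · -- ladder branch: a ladder is still free, i.e. pos.length < ladders.toNat
      rw [if_pos hlad]
      have hkL : pos.length < ladders.toNat := by omega
      have hm0 : pos.length - ladders.toNat = 0 := by omega
      have hm0' : pos.length + 1 - ladders.toNat = 0 := by omega
      rw [hm0, hm0']
      rw [hm0'] at hIH
      simp only [List.take_zero, List.sum_nil, sub_zero, List.drop_zero] at hIH ⊢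
      split_ifs with hb
      · rfl
      · have hl : ladders - ((min ladders.toNat pos.length : Nat) : Int) - 1
            = ladders - ((min ladders.toNat (pos.length + 1) : Nat) : Int) := by omega
        rw [hl]
        exact hIH
    · rw [if_neg hlad]
      have hL0k : ladders.toNat ≤ pos.length := by omega
      have hminEq : ladders - ((min ladders.toNat (pos.length + 1) : Nat) : Int)
          = ladders - ((min ladders.toNat pos.length : Nat) : Int) := by omega
      rw [hminEq] at hIH
      by_cases hL0 : ladders.toNat = 0
      · -- no ladders at all: the heap is empty, every diff is paid with bricks
        have hhp : ¬ (s.drop (pos.length - ladders.toNat) ≠ [] ∧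
            (s.drop (pos.length - ladders.toNat)).headD 0 < d) := by
          rintro ⟨hne, -⟩
          exact hne (List.drop_eq_nil_iff.mpr (by omega))
        rw [if_neg hhp]
        have hd1 : s.drop (pos.length - ladders.toNat) = [] :=
          List.drop_eq_nil_iff.mpr (by omega)
        have hd2 : (List.orderedInsert (· ≤ ·) d s).drop (pos.length + 1 - ladders.toNat) = [] :=
          List.drop_eq_nil_iff.mpr (by omega)
        have ht1 : s.take (pos.length - ladders.toNat) = s :=
          List.take_of_length_le (by omega)
        have ht2 : (List.orderedInsert (· ≤ ·) d s).take (pos.length + 1 - ladders.toNat)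
            = List.orderedInsert (· ≤ ·) d s :=
          List.take_of_length_le (by omega)
        have hsum2 : (List.orderedInsert (· ≤ ·) d s).sum = s.sum + d := by
          have h1 := (List.perm_orderedInsert (· ≤ ·) d s).sum_eq
          simp only [List.sum_cons] at h1
          omega
        rw [hd1, ht1, ht2, hsum2]
        rw [ht2, hd2, hsum2] at hIH
        split_ifs with h1 h2 h2
        · rfl
        · omega
        · omega
        · rw [show bricks0 - (s.sum + d) = bricks0 - s.sum - d by ring] at hIH
          exact hIH
      · -- ladders.toNat ladders are busy on the current top climbs
        have hmlen : pos.length - ladders.toNat < s.length := by omega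
        have hne2 : s.drop (pos.length - ladders.toNat) ≠ [] := by
          intro hc; rw [List.drop_eq_nil_iff] at hc; omega
        have hdropc := List.drop_eq_getElem_cons (l := s) hmlen
        have hhead : (s.drop (pos.length - ladders.toNat)).headD 0
            = s[pos.length - ladders.toNat] := by rw [hdropc]; rfl
        have hm1 : pos.length + 1 - ladders.toNat = pos.length - ladders.toNat + 1 := by omega
        rw [hm1] at hIH ⊢
        have hsum : (s.take (pos.length - ladders.toNat + 1)).sum
            = (s.take (pos.length - ladders.toNat)).sum + s[pos.length - ladders.toNat] := by
          rw [List.take_add_one, List.getElem?_eq_getElem hmlen, List.sum_append]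
          simp
        by_cases hhp : s.drop (pos.length - ladders.toNat) ≠ [] ∧
            (s.drop (pos.length - ladders.toNat)).headD 0 < d
        · -- the new diff is larger than the smallest ladder-covered one: swap them
          rw [if_pos hhp]
          obtain ⟨-, hhd⟩ := hhp
          rw [hhead] at hhd
          have h2eq : List.orderedInsert (· ≤ ·) d (s.drop (pos.length - ladders.toNat))
              = s[pos.length - ladders.toNat] ::
                List.orderedInsert (· ≤ ·) d (s.drop (pos.length - ladders.toNat + 1)) := by
            rw [hdropc]
            simp only [List.orderedInsert, if_neg (not_le.mpr hhd)]
          have hlow : ∀ b ∈ s.take (pos.length - ladders.toNat + 1), b < d := by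
            intro b hb
            obtain ⟨j, hj, hbj⟩ := List.mem_iff_getElem.mp hb
            rw [List.getElem_take] at hbj
            have hjm : j ≤ pos.length - ladders.toNat := by
              simp only [List.length_take] at hj; omega
            have := hmono j (pos.length - ladders.toNat) (by omega) hmlen hjm
            omega
          have hsplit : List.orderedInsert (· ≤ ·) d s
              = s.take (pos.length - ladders.toNat + 1) ++
                List.orderedInsert (· ≤ ·) d (s.drop (pos.length - ladders.toNat + 1)) := by
            conv_lhs => rw [← List.take_append_drop (pos.length - ladders.toNat + 1) s]
            exact oins_append_low d _ _ hlow
          have hlen_take : (s.take (pos.length - ladders.toNat + 1)).length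
              = pos.length - ladders.toNat + 1 := by
            rw [List.length_take]; omega
          have htake' : (List.orderedInsert (· ≤ ·) d s).take (pos.length - ladders.toNat + 1)
              = s.take (pos.length - ladders.toNat + 1) := by
            rw [hsplit, List.take_left' hlen_take]
          have hdrop' : (List.orderedInsert (· ≤ ·) d s).drop (pos.length - ladders.toNat + 1)
              = List.orderedInsert (· ≤ ·) d (s.drop (pos.length - ladders.toNat + 1)) := by
            rw [hsplit, List.drop_left' hlen_take]
          rw [h2eq, htake', hsum]
          rw [htake', hsum, hdrop'] at hIH
          simp only [List.headD_cons, List.tail_cons] at hIH ⊢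
          split_ifs with h1 h2 h2
          · rfl
          · omega
          · omega
          · rw [show bricks0 - ((s.take (pos.length - ladders.toNat)).sum +
                s[pos.length - ladders.toNat]) =
                bricks0 - (s.take (pos.length - ladders.toNat)).sum -
                s[pos.length - ladders.toNat] by ring] at hIH
            exact hIH
        · -- the new diff is paid with bricks, ladder assignment unchanged
          rw [if_neg hhp]
          have hdle : d ≤ s[pos.length - ladders.toNat] := by
            by_contra hc
            exact hhp ⟨hne2, by rw [hhead]; omega⟩
          have hhigh : ∀ b ∈ s.drop (pos.length - ladders.toNat), d ≤ b := by
            intro b hb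
            obtain ⟨j, hj, hbj⟩ := List.mem_iff_getElem.mp hb
            rw [List.getElem_drop] at hbj
            have hjlen : pos.length - ladders.toNat + j < s.length := by
              simp only [List.length_drop] at hj; omega
            have := hmono (pos.length - ladders.toNat) (pos.length - ladders.toNat + j)
              (by omega) hjlen (by omega)
            omega
          have hsplit2 : List.orderedInsert (· ≤ ·) d s
              = List.orderedInsert (· ≤ ·) d (s.take (pos.length - ladders.toNat)) ++
                s.drop (pos.length - ladders.toNat) := by
            conv_lhs => rw [← List.take_append_drop (pos.length - ladders.toNat) s]
            exact oins_append_high d _ _ hhigh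
          have hlen2 : (List.orderedInsert (· ≤ ·) d (s.take (pos.length - ladders.toNat))).length
              = pos.length - ladders.toNat + 1 := by
            rw [(List.perm_orderedInsert _ _ _).length_eq]
            simp only [List.length_cons, List.length_take]
            omega
          have htake2 : (List.orderedInsert (· ≤ ·) d s).take (pos.length - ladders.toNat + 1)
              = List.orderedInsert (· ≤ ·) d (s.take (pos.length - ladders.toNat)) := by
            rw [hsplit2, List.take_left' hlen2]
          have hdrop2 : (List.orderedInsert (· ≤ ·) d s).drop (pos.length - ladders.toNat + 1)
              = s.drop (pos.length - ladders.toNat) := by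
            rw [hsplit2, List.drop_left' hlen2]
          have hsum2 : (List.orderedInsert (· ≤ ·) d (s.take (pos.length - ladders.toNat))).sum
              = (s.take (pos.length - ladders.toNat)).sum + d := by
            have h1 := (List.perm_orderedInsert (· ≤ ·) d (s.take (pos.length - ladders.toNat))).sum_eq
            simp only [List.sum_cons] at h1
            omega
          rw [htake2, hsum2]
          rw [htake2, hsum2, hdrop2] at hIH
          split_ifs with h1 h2 h2
          · rfl
          · omega
          · omega
          · rw [show bricks0 - ((s.take (pos.length - ladders.toNat)).sum + d) =
                bricks0 - (s.take (pos.length - ladders.toNat)).sum - d by ring] at hIH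
            exact hIH

-- ===== VERDICT (by name: the statement is the Claim_ definition above) =====
theorem furthestBuilding2_spec : Claim_equal_furthestBuilding2 := by
  intro heights bricks ladders _
  unfold Spec_furthestBuilding2 furthestBuilding2 furthestBuilding2_alt
  have h := go_eq heights bricks ladders (heights.length) 0 [] (by omega)
  simpa [PySem.List.sorted] using h
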